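-- pv_equiv track=rewrite | github.com/apposengine/appos | appos/engine/security.py | _build_wildcard_patterns
-- ===== SOURCE A (Python) =====
-- from typing import Any, Dict, List, Optional, Set
--
-- def _build_wildcard_patterns(object_ref: str) -> List[str]:
--     """
--     Build wildcard patterns from most specific to least specific.
--
--     "crm.rules.calculate_discount" →
--         ["crm.rules.calculate_discount", "crm.rules.*", "crm.*", "*"]
--     """
--     patterns = [object_ref]
--     parts = object_ref.split(".")
--
--     for i in range(len(parts) - 1, 0, -1):
--         pattern = ".".join(parts[:i]) + ".*"
--         patterns.append(pattern)
--
--     patterns.append("*")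
--     return patterns
-- ===== SOURCE B (Python) =====
-- def _wildcard_tail(prefix):
--     # Patterns strictly more general than `prefix`: strip at the rightmost dot,
--     # emit that head plus ".*", and recurse on the head; ground out at "*".
--     i = prefix.rfind(".")
--     if i == -1:
--         return ["*"]
--     head = prefix[:i]
--     return [head + ".*"] + _wildcard_tail(head)
--
-- def _build_wildcard_patterns(object_ref):
--     return [object_ref] + _wildcard_tail(object_ref)
-- ===== Notes on version B (the rewrite author's own statement) =====
-- stated objective: alternative
-- what changed: B is a recursive descent on the rightmost dot: a helper strips the string at rfind('.') and recurses on the shrinking head to build the wildcard tail, instead of A's split-into-parts plus an indexed loop that re-joins parts[:i] each iteration.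
import Mathlib
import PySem

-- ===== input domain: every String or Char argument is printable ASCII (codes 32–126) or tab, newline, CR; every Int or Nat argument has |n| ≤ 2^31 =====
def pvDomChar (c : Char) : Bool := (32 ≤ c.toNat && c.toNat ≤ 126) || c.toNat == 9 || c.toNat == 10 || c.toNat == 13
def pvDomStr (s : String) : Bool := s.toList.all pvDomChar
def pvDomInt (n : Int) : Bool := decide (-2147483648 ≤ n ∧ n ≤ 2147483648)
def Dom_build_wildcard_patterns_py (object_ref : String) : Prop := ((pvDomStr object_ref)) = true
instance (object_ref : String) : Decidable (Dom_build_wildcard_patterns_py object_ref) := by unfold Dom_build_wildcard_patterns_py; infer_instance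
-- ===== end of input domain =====

-- B replaces A's split-into-parts + indexed loop that re-joins parts[:i] by a recursive descent
-- on the rightmost dot: strip at rfind('.'), emit head + ".*", recurse on the head (objective: alternative).

-- ===== PORT A =====
-- A: patterns = [object_ref]; parts = object_ref.split("."); for i in range(len(parts)-1, 0, -1):
--    patterns.append(".".join(parts[:i]) + ".*"); patterns.append("*"). Strings ported as List Char.
def build_wildcard_patterns_py (object_ref : String) : List String :=
  let patterns : List (List Char) := [object_ref.toList]
  let parts : List (List Char) := PySem.Chars.splitOn object_ref.toList ".".toList
  let patterns :=
    (PySem.List.pyRange ((parts.length : Int) - 1) 0 (-1)).foldl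
      (fun acc i =>
        acc ++ [PySem.Chars.join ".".toList (PySem.List.slice parts none (some i)) ++ ".*".toList])
      patterns
  let patterns := patterns ++ ["*".toList]
  patterns.map String.ofList

-- ===== PORT B =====
-- prefix.rfind("."): stdlib call, ported as the obvious recursion computing the last index of '.'
-- (or -1); exact for a single-character needle.
def pvRfindDot (cs : List Char) : Int :=
  match cs with
  | [] => -1
  | c :: rest =>
      let r := pvRfindDot rest
      if r ≠ -1 then r + 1 else if c = '.' then 0 else -1

theorem pvRfindDot_range (cs : List Char) :
    pvRfindDot cs = -1 ∨ (0 ≤ pvRfindDot cs ∧ pvRfindDot cs < cs.length) := by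
  induction cs with
  | nil => left; rfl
  | cons c rest ih =>
    rw [pvRfindDot]
    rcases ih with h | h
    · simp only [h]
      by_cases hc : c = '.'
      · right; simp [hc]
      · left; simp [hc]
    · right
      have : pvRfindDot rest ≠ -1 := by omega
      simp only [this, if_pos, ne_eq, not_false_eq_true, if_true, List.length_cons]
      omega

theorem pv_head_len_lt (cs : List Char) (h : ¬ pvRfindDot cs = -1) :
    (PySem.List.slice cs none (some (pvRfindDot cs))).length < cs.length := by
  rcases pvRfindDot_range cs with h' | h'
  · exact absurd h' h
  · rw [PySem.List.slice_to _ h'.1]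
    simp only [List.length_take]
    omega

-- B's recursive helper _wildcard_tail: i = prefix.rfind("."); if i == -1: return ["*"];
-- head = prefix[:i]; return [head + ".*"] + _wildcard_tail(head)
def bwp_tail (cs : List Char) : List (List Char) :=
  let i := pvRfindDot cs
  if h : i = -1 then [['*']]
  else
    let head := PySem.List.slice cs none (some i)
    (head ++ ".*".toList) :: bwp_tail head
termination_by cs.length
decreasing_by exact pv_head_len_lt cs h

-- B: return [object_ref] + _wildcard_tail(object_ref)
def build_wildcard_patterns_py_alt (object_ref : String) : List String :=
  (object_ref.toList :: bwp_tail object_ref.toList).map String.ofList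

-- ===== PRECONDITION & SPEC =====
def Spec_build_wildcard_patterns_py (object_ref : String) (out : List String) : Prop := out = build_wildcard_patterns_py_alt object_ref
instance (object_ref : String) (out : List String) : Decidable (Spec_build_wildcard_patterns_py object_ref out) := by unfold Spec_build_wildcard_patterns_py; infer_instance

-- ===== CLAIM (what is proved, stated in full; the proofs are below) =====
def Claim_equal_build_wildcard_patterns_py : Prop := ∀ (object_ref : String), Dom_build_wildcard_patterns_py object_ref → Spec_build_wildcard_patterns_py object_ref (build_wildcard_patterns_py object_ref)

-- ===== LEMMAS AND PROOFS =====

-- positions of '.' in a char list, in increasing order (proof-side reference list)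
def pvDotPos : List Char → List Nat
  | [] => []
  | c :: cs => if c = '.' then 0 :: (pvDotPos cs).map (· + 1) else (pvDotPos cs).map (· + 1)

-- PySem's split with a single-character separator is List.splitOnP
theorem pv_go_splitOnP (c : Char) :
    ∀ (fuel : Nat) (l cur : List Char) (acc : List (List Char)), l.length < fuel →
      PySem.Chars.splitOn.go [c] fuel l cur acc
        = acc.reverse ++ (List.splitOnP (· == c) l).modifyHead (cur.reverse ++ ·) := by
  intro fuel
  induction fuel with
  | zero => intro l cur acc h; omega
  | succ n ih =>
    intro l cur acc h
    cases l with
    | nil => simp [PySem.Chars.splitOn.go, List.splitOnP_nil]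
    | cons a rest =>
      by_cases hac : a = c
      · subst hac
        have hpre : List.isPrefixOf [a] (a :: rest) = true := by
          simp [List.isPrefixOf]
        rw [PySem.Chars.splitOn.go]
        simp only [hpre, if_true, List.length_singleton, List.drop_succ_cons, List.drop_zero]
        rw [ih rest [] (cur.reverse :: acc) (by simpa using Nat.lt_of_succ_lt_succ h)]
        simp only [List.splitOnP_cons, beq_self_eq_true, if_true, List.reverse_cons,
          List.reverse_nil, List.nil_append, List.append_assoc, List.singleton_append]
        simp only [List.modifyHead]
        cases List.splitOnP (fun x => x == a) rest <;> simp
      · have hpre : List.isPrefixOf [c] (a :: rest) = false := by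
          simp [List.isPrefixOf, BEq.beq]
          intro hh; exact hac hh.symm
        rw [PySem.Chars.splitOn.go]
        simp only [hpre, Bool.false_eq_true, if_false]
        rw [ih rest (a :: cur) acc (by simpa using Nat.lt_of_succ_lt_succ h)]
        rw [List.splitOnP_cons]
        have hne := List.splitOnP_ne_nil (· == c) rest
        cases hsp : List.splitOnP (· == c) rest with
        | nil => exact absurd hsp hne
        | cons h t => simp [hac, List.modifyHead]

theorem pv_splitOn_single (cs : List Char) (c : Char) :
    PySem.Chars.splitOn cs [c] = List.splitOnP (· == c) cs := by
  unfold PySem.Chars.splitOn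
  rw [pv_go_splitOnP c (cs.length + 1) cs [] [] (by omega)]
  have hne := List.splitOnP_ne_nil (· == c) cs
  cases hsp : List.splitOnP (· == c) cs with
  | nil => exact absurd hsp hne
  | cons h t => simp

theorem pv_length_splitOnP (cs : List Char) :
    (List.splitOnP (· == '.') cs).length = (pvDotPos cs).length + 1 := by
  induction cs with
  | nil => simp [List.splitOnP_nil, pvDotPos]
  | cons a rest ih =>
    rw [List.splitOnP_cons, pvDotPos]
    by_cases h : a = '.'
    · simp [h, ih]
    · have hne := List.splitOnP_ne_nil (· == '.') rest
      cases hsp : List.splitOnP (· == '.') rest with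
      | nil => exact absurd hsp hne
      | cons hd t =>
        rw [hsp] at ih
        simp [h, List.modifyHead, ← ih]

-- ".".join(parts[:j+1]) is the prefix of cs up to the (j+1)-st dot
theorem pv_join_take (cs : List Char) :
    ∀ j (hj : j < (pvDotPos cs).length),
      PySem.Chars.join ['.'] ((List.splitOnP (· == '.') cs).take (j + 1))
        = cs.take ((pvDotPos cs)[j]) := by
  induction cs with
  | nil => intro j hj; simp [pvDotPos] at hj
  | cons a rest ih =>
    intro j hj
    by_cases h : a = '.'
    · subst h
      rw [List.splitOnP_cons]
      simp only [pvDotPos, beq_self_eq_true, if_true] at hj ⊢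
      cases j with
      | zero => simp [PySem.Chars.join_singleton]
      | succ m =>
        have hm : m < (pvDotPos rest).length := by simpa using hj
        simp only [List.getElem_cons_succ, List.getElem_map, List.take_succ_cons]
        have hne := List.splitOnP_ne_nil (· == '.') rest
        cases hsp : List.splitOnP (· == '.') rest with
        | nil => exact absurd hsp hne
        | cons hd t =>
          have hih := ih m hm
          rw [hsp] at hih
          rw [List.take_succ_cons] at hih
          rw [List.take_succ_cons, PySem.Chars.join_cons_cons, hih]
          simp
    · rw [List.splitOnP_cons]
      have hb : (a == '.') = false := by simpa using h
      simp only [pvDotPos, if_neg h, hb, Bool.false_eq_true, if_false] at hj ⊢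
      have hm : j < (pvDotPos rest).length := by simpa using hj
      have hne := List.splitOnP_ne_nil (· == '.') rest
      cases hsp : List.splitOnP (· == '.') rest with
      | nil => exact absurd hsp hne
      | cons hd t =>
        have hih := ih j hm
        rw [hsp] at hih
        simp only [List.getElem_map, List.modifyHead_cons, List.take_succ_cons]
        cases j with
        | zero =>
          simp only [Nat.zero_add, List.take_succ_cons, List.take_zero,
            PySem.Chars.join_singleton] at hih
          simp only [List.take_zero]
          rw [PySem.Chars.join_singleton, hih]
        | succ m =>
          rw [List.take_succ_cons] at hih
          cases ht : List.take (m + 1) t with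
          | nil =>
            rw [ht, PySem.Chars.join_singleton] at hih
            rw [PySem.Chars.join_singleton, hih]
          | cons q r =>
            rw [ht, PySem.Chars.join_cons_cons] at hih
            rw [PySem.Chars.join_cons_cons]
            simp [List.cons_append, hih]

-- A's loop emits the prefixes at the dot positions of cs, longest first
theorem pv_middle (cs : List Char) :
    (PySem.List.pyRange (((PySem.Chars.splitOn cs ['.']).length : Int) - 1) 0 (-1)).map
        (fun i => PySem.Chars.join ['.']
            (PySem.List.slice (PySem.Chars.splitOn cs ['.']) none (some i)) ++ ".*".toList)
      = (pvDotPos cs).reverse.map (fun p => cs.take p ++ ".*".toList) := by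
  rw [pv_splitOn_single, pv_length_splitOnP]
  set L := (pvDotPos cs).length with hL
  rw [show ((L + 1 : Nat) : Int) - 1 = (L : Int) by push_cast; ring]
  rw [PySem.List.pyRange_neg_one]
  rw [show ((L : Int) - 0).toNat = L by omega]
  apply List.ext_getElem
  · simpa using hL
  intro t h1 h2
  simp only [List.length_map, List.length_range] at h1
  simp only [List.getElem_map, List.getElem_range, List.getElem_reverse, List.length_reverse]
  have hj : L - 1 - t < L := by omega
  rw [PySem.List.slice_to _ (by omega : (0:Int) ≤ (L : Int) - (t : Nat))]
  rw [show ((L : Int) - (t : Nat)).toNat = (L - 1 - t) + 1 by omega]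
  rw [pv_join_take cs (L - 1 - t) hj]

-- dot positions are strictly increasing
theorem pv_dotPos_pairwise (cs : List Char) : List.Pairwise (· < ·) (pvDotPos cs) := by
  induction cs with
  | nil => simp [pvDotPos]
  | cons c rest ih =>
    rw [pvDotPos]
    have hmap : List.Pairwise (· < ·) ((pvDotPos rest).map (· + 1)) := by
      apply List.Pairwise.map (· + 1) (fun a b h => by simpa using Nat.add_lt_add_right h 1) ih
    by_cases h : c = '.'
    · simp only [if_pos h]
      exact List.pairwise_cons.mpr ⟨by intro x hx; simp at hx; omega, hmap⟩
    · simpa [h] using hmap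

theorem pv_dotPos_lt_len (cs : List Char) : ∀ p ∈ pvDotPos cs, p < cs.length := by
  induction cs with
  | nil => simp [pvDotPos]
  | cons c rest ih =>
    intro p hp
    rw [pvDotPos] at hp
    by_cases h : c = '.'
    · rw [if_pos h] at hp
      rcases List.mem_cons.mp hp with h0 | h1
      · subst h0; simp
      · simp only [List.mem_map] at h1
        obtain ⟨q, hq, rfl⟩ := h1
        have := ih q hq; simp; omega
    · rw [if_neg h] at hp
      simp only [List.mem_map] at hp
      obtain ⟨q, hq, rfl⟩ := hp
      have := ih q hq; simp; omega

-- rfind('.') is the last dot position (or -1)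
theorem pv_rfind_getLast (cs : List Char) :
    pvRfindDot cs = ((pvDotPos cs).getLast?).elim (-1) Int.ofNat := by
  induction cs with
  | nil => simp [pvRfindDot, pvDotPos]
  | cons c rest ih =>
    rw [pvRfindDot, pvDotPos]
    cases hp : pvDotPos rest with
    | nil =>
      rw [hp] at ih
      simp only [Option.elim, List.getLast?_nil] at ih
      by_cases h : c = '.'
      · simp [h, ih]
      · simp [h, ih]
    | cons q t =>
      rw [hp] at ih
      have hlast : ((q :: t).getLast?).isSome = true := by
        simp [List.getLast?_isSome]
      obtain ⟨m, hm⟩ := Option.isSome_iff_exists.mp hlast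
      rw [hm] at ih
      simp only [Option.elim] at ih
      have hne : pvRfindDot rest ≠ -1 := by rw [ih]; simp [Int.ofNat_eq_natCast]
      have hmap : ((q :: t).map (· + 1)).getLast? = some (m + 1) := by
        rw [List.getLast?_map, hm]; rfl
      by_cases h : c = '.'
      · simp only [if_pos h, hne, ne_eq, not_false_eq_true, if_true, ih]
        rw [List.getLast?_cons, hmap]
        simp [Int.ofNat_eq_natCast]
      · simp only [if_neg h, hne, ne_eq, not_false_eq_true, if_true, ih]
        rw [hmap]
        simp [Int.ofNat_eq_natCast]

-- truncating at n keeps exactly the dot positions below n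
theorem pv_dotPos_take (cs : List Char) :
    ∀ n, pvDotPos (cs.take n) = (pvDotPos cs).takeWhile (fun p => decide (p < n)) := by
  induction cs with
  | nil => intro n; simp [pvDotPos]
  | cons c rest ih =>
    intro n
    cases n with
    | zero =>
      have hnone : ∀ (l : List Nat), l.takeWhile (fun p => decide (p < 0)) = [] := by
        intro l; cases l with
        | nil => rfl
        | cons a t => rw [List.takeWhile_cons]; simp
      rw [List.take_zero, hnone]
      rfl
    | succ m =>
      rw [List.take_succ_cons, pvDotPos, pvDotPos]
      have key : ((pvDotPos (List.take m rest)).map (· + 1))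
          = ((pvDotPos rest).map (· + 1)).takeWhile (fun p => decide (p < m + 1)) := by
        rw [ih m, List.takeWhile_map]
        have hfun : ((fun p => decide (p < m + 1)) ∘ fun x : Nat => x + 1)
            = (fun p : Nat => decide (p < m)) := by
          funext p
          simp only [Function.comp_apply, decide_eq_decide]
          omega
        rw [hfun]
      by_cases h : c = '.'
      · rw [if_pos h, if_pos h, key, List.takeWhile_cons]
        simp
      · rw [if_neg h, if_neg h, key]

theorem pv_takeWhile_all (p : Nat → Bool) :
    ∀ (l : List Nat) (m : Nat), (∀ x ∈ l, p x = true) → p m = false →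
      (l ++ [m]).takeWhile p = l := by
  intro l
  induction l with
  | nil => intro m _ hm; simp [List.takeWhile_cons, hm]
  | cons a t ih =>
    intro m hall hm
    rw [List.cons_append, List.takeWhile_cons]
    rw [hall a (by simp)]
    simp [ih m (fun x hx => hall x (by simp [hx])) hm]

-- B's recursion computes exactly A's middle patterns followed by "*"
theorem pv_tail : ∀ (n : Nat) (cs : List Char), cs.length ≤ n →
    bwp_tail cs = (pvDotPos cs).reverse.map (fun p => cs.take p ++ ".*".toList) ++ [['*']] := by
  intro n
  induction n with
  | zero =>
    intro cs h
    have : cs = [] := List.eq_nil_of_length_eq_zero (by omega)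
    subst this
    rw [bwp_tail]
    simp [pvRfindDot, pvDotPos]
  | succ k ih =>
    intro cs hlen
    rw [bwp_tail]
    by_cases hnil : pvDotPos cs = []
    · have hr : pvRfindDot cs = -1 := by simp [pv_rfind_getLast, hnil]
      simp [hr, hnil]
    · have hne := hnil
      have hlast : (pvDotPos cs).getLast? = some ((pvDotPos cs).getLast hne) :=
        List.getLast?_eq_some_getLast hne
      set m := (pvDotPos cs).getLast hne with hm
      have hr : pvRfindDot cs = Int.ofNat m := by
        simp [pv_rfind_getLast, hlast]
      have hrne : ¬ pvRfindDot cs = -1 := by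
        rw [hr]; simp [Int.ofNat_eq_natCast]
      simp only [hrne, dif_neg, not_false_eq_true]
      have hmlt : m < cs.length := pv_dotPos_lt_len cs m (hm ▸ List.getLast_mem hne)
      have hslice : PySem.List.slice cs none (some (pvRfindDot cs)) = cs.take m := by
        rw [hr, PySem.List.slice_to _ (by simp [Int.ofNat_eq_natCast])]
        simp [Int.ofNat_eq_natCast]
      rw [hslice]
      have hdecomp : pvDotPos cs = (pvDotPos cs).dropLast ++ [m] :=
        (List.dropLast_append_getLast hne).symm
      have hall : ∀ x ∈ (pvDotPos cs).dropLast, x < m := by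
        have hpw := pv_dotPos_pairwise cs
        rw [hdecomp] at hpw
        intro x hx
        exact (List.pairwise_append.mp hpw).2.2 x hx m (by simp)
      have htake : pvDotPos (cs.take m) = (pvDotPos cs).dropLast := by
        rw [pv_dotPos_take cs m]
        conv_lhs => rw [hdecomp]
        exact pv_takeWhile_all _ _ m (fun x hx => by simp [hall x hx]) (by simp)
      rw [ih (cs.take m) (by simp; omega), htake]
      conv_rhs => rw [hdecomp]
      rw [List.reverse_append, List.reverse_singleton, List.singleton_append, List.map_cons]
      congr 1
      rw [List.append_eq]
      congr 1
      apply List.map_congr_left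
      intro x hx
      have hx' : x ∈ (pvDotPos cs).dropLast := List.mem_reverse.mp hx
      rw [List.take_take, Nat.min_eq_left (Nat.le_of_lt (hall x hx'))]

-- ===== VERDICT (by name: the statement is the Claim_ definition above) =====
theorem build_wildcard_patterns_py_spec : Claim_equal_build_wildcard_patterns_py := by
  intro object_ref _
  unfold Spec_build_wildcard_patterns_py
  unfold build_wildcard_patterns_py build_wildcard_patterns_py_alt
  simp only [PySem.List.foldl_append_singleton_eq_map]
  rw [show ".".toList = ['.'] from rfl, pv_middle object_ref.toList,
    pv_tail object_ref.toList.length object_ref.toList le_rfl]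
  simp
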